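-- pv_equiv track=rewrite | github.com/Suhasvalasala24/AI-Auditor | backend/audit_engine.py | _metric_family
-- ===== SOURCE A (Python) =====
-- METRIC_FAMILIES = ["bias", "pii", "hallucination", "compliance", "drift", "phi"]
--
-- def _norm(name: str) -> str:
--     return (name or "").strip().lower()
--
-- def _metric_family(category: str, metric_name: str) -> str:
--     c = _norm(category)
--     m = _norm(metric_name)
--
--     if m in METRIC_FAMILIES:
--         return m
--
--     for fam in METRIC_FAMILIES:
--         if m.startswith(fam + "_"):
--             return fam
--
--     if c in METRIC_FAMILIES:
--         return c
--
--     return "compliance"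
-- ===== SOURCE B (Python) =====
-- METRIC_FAMILIES = ["bias", "pii", "hallucination", "compliance", "drift", "phi"]
--
-- _FAMILY = {f: f for f in METRIC_FAMILIES}
--
-- def _norm(name: str) -> str:
--     return (name or "").strip().lower()
--
-- def _metric_family(category: str, metric_name: str) -> str:
--     # Family names contain no underscore, so both A's exact-membership test and
--     # its per-family startswith scan amount to looking up the chunk of the
--     # metric name before the first underscore in a dict of family names.
--     hit = _FAMILY.get(_norm(metric_name).partition('_')[0])
--     if hit is not None:
--         return hit
--     return _FAMILY.get(_norm(category), "compliance")
-- ===== Notes on version B (the rewrite author's own statement) =====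
-- stated objective: simpler
-- what changed: Replaces A's exact-membership test plus per-family startswith loop by one partition('_')[0] followed by two dict lookups (valid because family names contain no underscore).
import Mathlib
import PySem

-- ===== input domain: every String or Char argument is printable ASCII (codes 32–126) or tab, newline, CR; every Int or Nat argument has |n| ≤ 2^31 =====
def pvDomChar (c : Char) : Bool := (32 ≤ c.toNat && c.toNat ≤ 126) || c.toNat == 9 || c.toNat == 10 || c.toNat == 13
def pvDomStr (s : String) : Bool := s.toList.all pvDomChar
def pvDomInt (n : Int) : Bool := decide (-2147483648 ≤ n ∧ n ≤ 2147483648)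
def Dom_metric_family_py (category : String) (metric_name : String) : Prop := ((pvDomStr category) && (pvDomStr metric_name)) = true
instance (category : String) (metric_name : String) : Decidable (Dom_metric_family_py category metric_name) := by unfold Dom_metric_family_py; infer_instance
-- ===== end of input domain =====

-- B replaces A's exact-membership test plus per-family startswith loop by one
-- partition('_')[0] followed by two lookups in a precomputed {family: family}
-- dict (simpler; same result because family names contain no underscore).


-- _norm(name) = (name or "").strip().lower(); on str inputs `name or ""` is the identity
def pvNorm (name : String) : List Char :=
  PySem.Chars.lower (PySem.Chars.strip name.toList)

-- ===== PORT A =====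
-- METRIC_FAMILIES (module constant), as lists of chars
def pvFamilies : List (List Char) :=
  [['b','i','a','s'], ['p','i','i'],
   ['h','a','l','l','u','c','i','n','a','t','i','o','n'],
   ['c','o','m','p','l','i','a','n','c','e'],
   ['d','r','i','f','t'], ['p','h','i']]

-- the `for fam in METRIC_FAMILIES: if m.startswith(fam + "_"): return fam` loop
def pvLoopA (m : List Char) : List (List Char) → Option (List Char)
  | [] => none
  | fam :: rest =>
      if PySem.Chars.startswith m (fam ++ ['_']) then some fam else pvLoopA m rest

def metric_family_py (category : String) (metric_name : String) : String :=
  let c := pvNorm category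
  let m := pvNorm metric_name
  if m ∈ pvFamilies then String.ofList m
  else
    match pvLoopA m pvFamilies with
    | some fam => String.ofList fam
    | none => if c ∈ pvFamilies then String.ofList c else "compliance"

-- ===== PORT B =====
-- _FAMILY = {f: f for f in METRIC_FAMILIES}, a module-level dict built once
def pvFamDict : PySem.Dict (List Char) (List Char) :=
  PySem.Dict.ofList
    [(['b','i','a','s'], ['b','i','a','s']),
     (['p','i','i'], ['p','i','i']),
     (['h','a','l','l','u','c','i','n','a','t','i','o','n'], ['h','a','l','l','u','c','i','n','a','t','i','o','n']),
     (['c','o','m','p','l','i','a','n','c','e'], ['c','o','m','p','l','i','a','n','c','e']),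
     (['d','r','i','f','t'], ['d','r','i','f','t']),
     (['p','h','i'], ['p','h','i'])]

def metric_family_py_alt (category : String) (metric_name : String) : String :=
  -- s.partition('_')[0] has no PySem primitive: it is exactly the characters
  -- before the first '_' (all of s when '_' is absent) = takeWhile (· ≠ '_')
  match pvFamDict.get? ((pvNorm metric_name).takeWhile (· ≠ '_')) with
  | some hit => String.ofList hit
  | none => String.ofList (pvFamDict.getD (pvNorm category) ['c','o','m','p','l','i','a','n','c','e'])

-- ===== PRECONDITION & SPEC =====
def Spec_metric_family_py (category : String) (metric_name : String) (out : String) : Prop := out = metric_family_py_alt category metric_name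
instance (category : String) (metric_name : String) (out : String) : Decidable (Spec_metric_family_py category metric_name out) := by unfold Spec_metric_family_py; infer_instance

-- ===== CLAIM (what is proved, stated in full; the proofs are below) =====
def Claim_equal_metric_family_py : Prop := ∀ (category : String) (metric_name : String), Dom_metric_family_py category metric_name → Spec_metric_family_py category metric_name (metric_family_py category metric_name)

-- ===== LEMMAS AND PROOFS =====

-- B's dict is the identity table on pvFamilies
theorem pv_dict_items :
    pvFamDict = PySem.Dict.mk
      [(['b','i','a','s'], ['b','i','a','s']),
       (['p','i','i'], ['p','i','i']),
       (['h','a','l','l','u','c','i','n','a','t','i','o','n'], ['h','a','l','l','u','c','i','n','a','t','i','o','n']),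
       (['c','o','m','p','l','i','a','n','c','e'], ['c','o','m','p','l','i','a','n','c','e']),
       (['d','r','i','f','t'], ['d','r','i','f','t']),
       (['p','h','i'], ['p','h','i'])] := by decide

theorem pv_dict_get (x : List Char) :
    pvFamDict.get? x = if x ∈ pvFamilies then some x else none := by
  by_cases h1 : x = ['b','i','a','s']
  · subst h1; decide
  by_cases h2 : x = ['p','i','i']
  · subst h2; decide
  by_cases h3 : x = ['h','a','l','l','u','c','i','n','a','t','i','o','n']
  · subst h3; decide
  by_cases h4 : x = ['c','o','m','p','l','i','a','n','c','e']
  · subst h4; decide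
  by_cases h5 : x = ['d','r','i','f','t']
  · subst h5; decide
  by_cases h6 : x = ['p','h','i']
  · subst h6; decide
  have hm : x ∉ pvFamilies := by
    simp [pvFamilies, h1, h2, h3, h4, h5, h6]
  rw [if_neg hm, pv_dict_items]
  simp [PySem.Dict.get?, Ne.symm h1, Ne.symm h2, Ne.symm h3, Ne.symm h4,
        Ne.symm h5, Ne.symm h6]

theorem pv_tw_self (m : List Char) (h : ∀ a ∈ m, a ≠ '_') : m.takeWhile (· ≠ '_') = m := by
  induction m with
  | nil => rfl
  | cons a l ih =>
    simp only [List.takeWhile_cons, decide_eq_true_eq]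
    rw [if_pos (h a (by simp)), ih fun x hx => h x (by simp [hx])]

theorem pv_tw_app (fam t : List Char) (hf : '_' ∉ fam) :
    (fam ++ '_' :: t).takeWhile (· ≠ '_') = fam := by
  rw [List.takeWhile_append, pv_tw_self fam (fun a ha he => hf (he ▸ ha))]
  simp

-- m.startswith(fam + "_") holds exactly when fam is the chunk before m's first underscore
theorem pv_prefix_iff (fam m : List Char) (hf : '_' ∉ fam) (hm : '_' ∈ m) :
    PySem.Chars.startswith m (fam ++ ['_']) = true ↔ m.takeWhile (· ≠ '_') = fam := by
  rw [PySem.Chars.startswith_iff]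
  constructor
  · rintro ⟨t, rfl⟩
    simpa using pv_tw_app fam t hf
  · intro ht
    have hd : m.dropWhile (· ≠ '_') ≠ [] := by
      intro hnil
      have := List.dropWhile_eq_nil_iff.mp hnil '_' hm
      simp at this
    obtain ⟨d, ds, hds⟩ : ∃ d ds, m.dropWhile (· ≠ '_') = d :: ds := by
      cases hcase : m.dropWhile (· ≠ '_') with
      | nil => exact absurd hcase hd
      | cons d ds => exact ⟨d, ds, rfl⟩
    have hdu : d = '_' := by
      have h2 := List.head_dropWhile_not (fun x => decide (x ≠ '_')) hd
      have h3 : some ((m.dropWhile (· ≠ '_')).head hd) = some d := by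
        rw [← List.head?_eq_some_head, hds]; rfl
      rw [Option.some_inj.mp h3] at h2
      simpa using h2
    refine ⟨ds, ?_⟩
    calc fam ++ ['_'] ++ ds
        = fam ++ ('_' :: ds) := by simp
      _ = m.takeWhile (· ≠ '_') ++ m.dropWhile (· ≠ '_') := by rw [ht, hds, hdu]
      _ = m := List.takeWhile_append_dropWhile

theorem pv_fam_no_underscore : ∀ f ∈ pvFamilies, '_' ∉ f := by decide

-- A's loop finds nothing when m has no underscore
theorem pv_loop_none (m : List Char) (hm : '_' ∉ m) :
    ∀ fams, pvLoopA m fams = none := by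
  intro fams
  induction fams with
  | nil => rfl
  | cons fam rest ih =>
    have hsw : ¬ PySem.Chars.startswith m (fam ++ ['_']) = true := by
      intro h
      rcases (PySem.Chars.startswith_iff m (fam ++ ['_'])).mp h with ⟨t, rfl⟩
      exact hm (by simp)
    simp [pvLoopA, hsw, ih]

-- when m contains an underscore, A's loop is exactly a lookup of the head chunk
theorem pv_loop_char (m : List Char) (hm : '_' ∈ m) :
    ∀ fams, (∀ f ∈ fams, '_' ∉ f) →
    pvLoopA m fams =
      if m.takeWhile (· ≠ '_') ∈ fams then some (m.takeWhile (· ≠ '_')) else none := by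
  intro fams
  induction fams with
  | nil => intro _; rfl
  | cons fam rest ih =>
    intro hall
    have hf : '_' ∉ fam := hall fam (by simp)
    by_cases heq : m.takeWhile (· ≠ '_') = fam
    · have hsw : PySem.Chars.startswith m (fam ++ ['_']) = true :=
        (pv_prefix_iff fam m hf hm).mpr heq
      have hmem : m.takeWhile (· ≠ '_') ∈ fam :: rest := by rw [heq]; simp
      rw [show pvLoopA m (fam :: rest) = some fam from by simp [pvLoopA, hsw],
        if_pos hmem, heq]
    · have hsw : ¬ PySem.Chars.startswith m (fam ++ ['_']) = true := by
        intro h; exact heq ((pv_prefix_iff fam m hf hm).mp h)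
      rw [show pvLoopA m (fam :: rest) = pvLoopA m rest from by simp [pvLoopA, hsw]]
      rw [ih (fun f hf' => hall f (by simp [hf']))]
      have hiff : (m.takeWhile (· ≠ '_') ∈ rest) ↔ (m.takeWhile (· ≠ '_') ∈ fam :: rest) := by
        constructor
        · exact fun h => List.mem_cons_of_mem _ h
        · intro h
          rcases List.mem_cons.mp h with h | h
          · exact absurd h heq
          · exact h
      rw [if_congr hiff rfl rfl]

-- the category fallback, in both phrasings
theorem pv_fallback (c : List Char) :
    (if c ∈ pvFamilies then String.ofList c else "compliance")
    = String.ofList (pvFamDict.getD c ['c','o','m','p','l','i','a','n','c','e']) := by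
  rw [PySem.Dict.getD_eq_get?_getD, pv_dict_get]
  by_cases hc : c ∈ pvFamilies
  · rw [if_pos hc, if_pos hc]; rfl
  · rw [if_neg hc, if_neg hc]; rfl

theorem pv_key (c m : List Char) :
    (if m ∈ pvFamilies then String.ofList m
     else
       match pvLoopA m pvFamilies with
       | some fam => String.ofList fam
       | none => if c ∈ pvFamilies then String.ofList c else "compliance")
    = (match pvFamDict.get? (m.takeWhile (· ≠ '_')) with
       | some hit => String.ofList hit
       | none => String.ofList (pvFamDict.getD c ['c','o','m','p','l','i','a','n','c','e'])) := by
  rw [pv_dict_get]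
  by_cases hm : '_' ∈ m
  · have hmf : m ∉ pvFamilies := fun h => (pv_fam_no_underscore m h) hm
    rw [if_neg hmf, pv_loop_char m hm pvFamilies pv_fam_no_underscore]
    by_cases ht : m.takeWhile (· ≠ '_') ∈ pvFamilies
    · rw [if_pos ht]
    · rw [if_neg ht]; exact pv_fallback c
  · have ht : m.takeWhile (· ≠ '_') = m :=
      pv_tw_self m (fun a ha he => hm (he ▸ ha))
    rw [ht, pv_loop_none m hm pvFamilies]
    by_cases hmem : m ∈ pvFamilies
    · simp only [if_pos hmem]
    · simp only [if_neg hmem]; exact pv_fallback c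

-- ===== VERDICT (by name: the statement is the Claim_ definition above) =====
theorem metric_family_py_spec : Claim_equal_metric_family_py := by
  intro category metric_name _
  unfold Spec_metric_family_py metric_family_py metric_family_py_alt
  exact pv_key (pvNorm category) (pvNorm metric_name)
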